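-- pv_equiv track=rewrite | github.com/ravenCondol/daily_byte | 3_SingleRowKeyboard/main.py | single_row_iterative
-- ===== SOURCE A (Python) =====
-- row1 = ['q', 'w', 'e', 'r', 't', 'y', 'u', 'i', 'o', 'p']
--
-- row2 = ['a', 's', 'd', 'f', 'g', 'h', 'j', 'k', 'l']
--
-- def single_row_iterative(arr):
--     retArr = []
--     for item in arr:
--         if item == "":
--             retArr.append(item)
--         else:
--             row = get_row(item[0])
--             for index, letter in enumerate(item):
--                 if get_row(letter) != row:
--                     break
--                 if index == len(item)-1:
--                     retArr.append(item)
--     return retArr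
--
-- def get_row(char):
--     if char in row1:
--         return 1
--     elif char in row2:
--         return 2
--     else:
--         return 3
-- ===== SOURCE B (Python) =====
-- ROW1 = frozenset('qwertyuiop')
-- ROW2 = frozenset('asdfghjkl')
--
-- def single_row_iterative(arr):
--     both = ROW1 | ROW2
--     out = []
--     for item in arr:
--         ws = set(item)
--         if ws <= ROW1 or ws <= ROW2 or ws.isdisjoint(both):
--             out.append(item)
--     return out
-- ===== Notes on version B (the rewrite author's own statement) =====
-- stated objective: idiomatic
-- what changed: Replaces the per-character Python-level scan with early break and index/row tracking by a single set-subset test per word (word's character set ⊆ row1, ⊆ row2, or disjoint from both, the 'row 3' complement), using C-level frozenset operations.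
import Mathlib
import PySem

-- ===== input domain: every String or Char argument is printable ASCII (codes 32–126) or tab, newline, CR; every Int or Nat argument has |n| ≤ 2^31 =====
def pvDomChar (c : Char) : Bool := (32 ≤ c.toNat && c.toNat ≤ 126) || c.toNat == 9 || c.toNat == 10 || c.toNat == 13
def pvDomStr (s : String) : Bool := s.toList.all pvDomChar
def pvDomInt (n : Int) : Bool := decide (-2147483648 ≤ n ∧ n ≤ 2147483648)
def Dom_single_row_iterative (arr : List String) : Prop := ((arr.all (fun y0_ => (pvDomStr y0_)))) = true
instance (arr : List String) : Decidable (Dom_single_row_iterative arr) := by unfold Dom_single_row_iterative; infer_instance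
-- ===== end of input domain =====

-- B replaces A's per-character scan (with early break and index tracking) by a set-subset
-- test of the word's character set against the two keyboard rows; objective: idiomatic.

-- ===== PORT A =====
def pvrow1 : List Char := ['q','w','e','r','t','y','u','i','o','p']
def pvrow2 : List Char := ['a','s','d','f','g','h','j','k','l']

def get_row (c : Char) : Int :=
  if c ∈ pvrow1 then 1 else if c ∈ pvrow2 then 2 else 3

-- the inner 'for index, letter in enumerate(item)' loop with its break
def loopA (item : String) (row : Int) (len : Nat) : List Char → Nat → List String → List String
  | [], _, ret => ret
  | c :: rest, idx, ret =>
    if get_row c ≠ row then ret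
    else if idx = len - 1 then loopA item row len rest (idx + 1) (ret ++ [item])
    else loopA item row len rest (idx + 1) ret

def stepA (ret : List String) (item : String) : List String :=
  match item.toList with
  | [] => ret ++ [item]
  | c :: _ => loopA item (get_row c) item.toList.length item.toList 0 ret

def single_row_iterative (arr : List String) : List String :=
  arr.foldl stepA []

-- ===== PORT B =====
def pvROW1 : PySem.Set Char := PySem.Set.ofList ['q','w','e','r','t','y','u','i','o','p']
def pvROW2 : PySem.Set Char := PySem.Set.ofList ['a','s','d','f','g','h','j','k','l']

def single_row_iterative_alt (arr : List String) : List String :=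
  let both := PySem.Set.union pvROW1 pvROW2
  arr.foldl (fun out item =>
    let ws := PySem.Set.ofList item.toList
    if PySem.Set.issubset ws pvROW1 || PySem.Set.issubset ws pvROW2
        || PySem.Set.isdisjoint ws both
    then out ++ [item] else out) []

-- ===== PRECONDITION & SPEC =====
def Spec_single_row_iterative (arr : List String) (out : List String) : Prop := out = single_row_iterative_alt arr
instance (arr : List String) (out : List String) : Decidable (Spec_single_row_iterative arr out) := by unfold Spec_single_row_iterative; infer_instance

-- ===== CLAIM (what is proved, stated in full; the proofs are below) =====
def Claim_equal_single_row_iterative : Prop := ∀ (arr : List String), Dom_single_row_iterative arr → Spec_single_row_iterative arr (single_row_iterative arr)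

-- ===== LEMMAS AND PROOFS =====

def stepB (out : List String) (item : String) : List String :=
  let ws := PySem.Set.ofList item.toList
  if PySem.Set.issubset ws pvROW1 || PySem.Set.issubset ws pvROW2
      || PySem.Set.isdisjoint ws (PySem.Set.union pvROW1 pvROW2)
  then out ++ [item] else out

lemma loopA_eq (item : String) (row : Int) :
    ∀ (chars : List Char) (k : Nat) (ret : List String), chars ≠ [] →
      loopA item row (k + chars.length) chars k ret =
        if chars.all (fun c => get_row c == row) then ret ++ [item] else ret := by
  intro chars
  induction chars with
  | nil => intro k ret h; exact absurd rfl h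
  | cons c rest ih =>
    intro k ret _
    match rest with
    | [] =>
      conv_lhs => rw [loopA]
      by_cases h : get_row c = row
      · simp [h, loopA]
      · simp [h]
    | c2 :: rest2 =>
      conv_lhs => rw [loopA]
      by_cases h : get_row c = row
      · rw [if_neg (not_not_intro h)]
        rw [if_neg (show ¬ (k = k + (c :: c2 :: rest2).length - 1) by
          simp only [List.length_cons]; omega)]
        have harith : k + (c :: c2 :: rest2).length = (k + 1) + (c2 :: rest2).length := by
          simp only [List.length_cons]; omega
        rw [harith, ih (k + 1) ret (by simp)]
        simp [h]
      · simp [h]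

lemma mem_both (x : Char) : x ∈ PySem.Set.union pvROW1 pvROW2 ↔ x ∈ pvrow1 ∨ x ∈ pvrow2 := by
  have h : PySem.Set.union pvROW1 pvROW2 = pvrow1 ++ pvrow2 := by decide
  rw [h]; simp [List.mem_append]

lemma row2_not_row1 (x : Char) (h : x ∈ pvrow2) : x ∉ pvrow1 := by
  fin_cases h <;> decide

lemma get_row_eq_one (x : Char) : get_row x = 1 ↔ x ∈ pvrow1 := by
  unfold get_row; split_ifs with h1 h2 <;> simp_all

lemma get_row_eq_two (x : Char) : get_row x = 2 ↔ x ∉ pvrow1 ∧ x ∈ pvrow2 := by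
  unfold get_row; split_ifs with h1 h2 <;> simp_all

lemma get_row_eq_three (x : Char) : get_row x = 3 ↔ x ∉ pvrow1 ∧ x ∉ pvrow2 := by
  unfold get_row; split_ifs with h1 h2 <;> simp_all

lemma row_equiv (c : Char) (rest : List Char) :
    (∀ x ∈ c :: rest, get_row x = get_row c) ↔
      ((∀ x ∈ c :: rest, x ∈ pvrow1) ∨ (∀ x ∈ c :: rest, x ∈ pvrow2) ∨
        (∀ x ∈ c :: rest, x ∉ pvrow1 ∧ x ∉ pvrow2)) := by
  constructor
  · intro h
    by_cases h1 : c ∈ pvrow1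
    · left; intro x hx
      exact (get_row_eq_one x).1 ((h x hx).trans ((get_row_eq_one c).2 h1))
    · by_cases h2 : c ∈ pvrow2
      · right; left; intro x hx
        exact ((get_row_eq_two x).1 ((h x hx).trans ((get_row_eq_two c).2 ⟨h1, h2⟩))).2
      · right; right; intro x hx
        exact (get_row_eq_three x).1 ((h x hx).trans ((get_row_eq_three c).2 ⟨h1, h2⟩))
  · intro h x hx
    rcases h with h | h | h
    · rw [(get_row_eq_one x).2 (h x hx), (get_row_eq_one c).2 (h c (by simp))]
    · have hx2 := h x hx; have hc2 := h c (by simp)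
      rw [(get_row_eq_two x).2 ⟨row2_not_row1 x hx2, hx2⟩,
          (get_row_eq_two c).2 ⟨row2_not_row1 c hc2, hc2⟩]
    · rw [(get_row_eq_three x).2 (h x hx), (get_row_eq_three c).2 (h c (by simp))]

lemma step_eq : stepA = stepB := by
  funext ret item
  unfold stepA stepB
  generalize item.toList = l
  match l with
  | [] =>
    simp [PySem.Set.ofList, PySem.Set.issubset_iff]
  | c :: rest =>
    have hlen : (c :: rest).length = 0 + (c :: rest).length := by omega
    simp only []
    rw [hlen, loopA_eq item (get_row c) (c :: rest) 0 ret (by simp)]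
    have hmem : ∀ x : Char, x ∈ PySem.Set.ofList (c :: rest) ↔ x ∈ c :: rest := by
      intro x; simp [PySem.Set.mem_ofList]
    by_cases hcond : ∀ x ∈ c :: rest, get_row x = get_row c
    · rw [if_pos, if_pos]
      · rcases (row_equiv c rest).1 hcond with h | h | h
        · simp only [Bool.or_eq_true]
          left; left
          rw [PySem.Set.issubset_iff _ _]
          intro x hx; exact h x ((hmem x).1 hx)
        · simp only [Bool.or_eq_true]
          left; right
          rw [PySem.Set.issubset_iff _ _]
          intro x hx; exact h x ((hmem x).1 hx)
        · simp only [Bool.or_eq_true]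
          right
          rw [PySem.Set.isdisjoint_iff _ _]
          intro x hx hxb
          rcases (mem_both x).1 hxb with h1 | h2
          · exact (h x ((hmem x).1 hx)).1 h1
          · exact (h x ((hmem x).1 hx)).2 h2
      · simp only [List.all_eq_true, beq_iff_eq]; exact hcond
    · rw [if_neg, if_neg]
      · intro hB
        apply hcond
        apply (row_equiv c rest).2
        simp only [Bool.or_eq_true] at hB
        rcases hB with (h | h) | h
        · left; intro x hx
          exact (PySem.Set.issubset_iff _ _).1 h x ((hmem x).2 hx)
        · right; left; intro x hx
          exact (PySem.Set.issubset_iff _ _).1 h x ((hmem x).2 hx)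
        · right; right; intro x hx
          have := (PySem.Set.isdisjoint_iff _ _).1 h x ((hmem x).2 hx)
          constructor
          · intro h1; exact this ((mem_both x).2 (Or.inl h1))
          · intro h2; exact this ((mem_both x).2 (Or.inr h2))
      · simp only [List.all_eq_true, beq_iff_eq]; exact hcond

-- ===== VERDICT (by name: the statement is the Claim_ definition above) =====
theorem single_row_iterative_spec : Claim_equal_single_row_iterative := by
  intro arr _
  unfold Spec_single_row_iterative single_row_iterative single_row_iterative_alt
  rw [step_eq]
  rfl
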